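-- pv_equiv track=rewrite | github.com/TmaxSoftProject/ChatBot_TmaxProject | 후속질문추천시스템연구/2차_usingGPTapi_답변의 핵심키워드추출.py | define_recomm_keyword1
-- ===== SOURCE A (Python) =====
-- def define_recomm_keyword1(key_ans,key_qes):
--
--     keyword_list=[]
--     for i in range(len(key_qes)):
--         for j in range(len(key_ans)-1,-1,-1):
--             if key_qes[i][0] in key_ans[j][0]:
--                 del key_ans[j] # **error index out of range에러 =>> 해결
--
--     for item in key_ans:
--         a=item[0].replace(' ','')
--         keyword_list.append(a)
--
--     return keyword_list
-- ===== SOURCE B (Python) =====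
-- # Single-pass filter: keep an answer iff no question keyword is a substring of it,
-- # then strip spaces; also updates key_ans in place like A (A deletes matching entries).
-- def define_recomm_keyword1(key_ans, key_qes):
--     qs = [q[0] for q in key_qes]
--     kept = [a for a in key_ans if not any(q in a[0] for q in qs)]
--     key_ans[:] = kept
--     return [a[0].replace(' ', '') for a in kept]
-- ===== Notes on version B (the rewrite author's own statement) =====
-- stated objective: simpler
-- what changed: Replaces the per-question reverse-index deletion loops (with in-place del of key_ans) by a single filtering pass that keeps an answer iff no question keyword is a substring of it, then maps the space-stripping over the kept list.
-- outside the precondition, e.g. on define_recomm_keyword1([], [[]]): A returns [], B raises IndexError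
import Mathlib
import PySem

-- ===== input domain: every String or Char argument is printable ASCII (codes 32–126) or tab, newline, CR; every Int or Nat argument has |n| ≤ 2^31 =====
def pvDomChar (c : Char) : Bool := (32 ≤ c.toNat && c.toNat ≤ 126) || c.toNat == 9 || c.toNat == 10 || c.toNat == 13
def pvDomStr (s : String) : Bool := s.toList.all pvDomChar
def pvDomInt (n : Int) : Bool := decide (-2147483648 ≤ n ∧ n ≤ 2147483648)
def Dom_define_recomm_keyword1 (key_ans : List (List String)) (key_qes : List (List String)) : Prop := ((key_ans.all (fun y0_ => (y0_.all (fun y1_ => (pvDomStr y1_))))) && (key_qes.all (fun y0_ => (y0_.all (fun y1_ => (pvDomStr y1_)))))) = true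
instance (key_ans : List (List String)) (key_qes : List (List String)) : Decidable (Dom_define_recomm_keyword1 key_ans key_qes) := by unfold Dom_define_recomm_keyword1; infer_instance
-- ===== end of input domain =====

-- B replaces A's per-question reverse-index deletion loops by one filtering pass (objective: simpler).
-- A mutates key_ans in place (deletes matching entries); the equivalence proved here is about the
-- RETURN value only (the Python B performs the same final mutation via key_ans[:] = kept).

-- ===== PORT A =====
-- inner loop body: 'if key_qes[i][0] in key_ans[j][0]: del key_ans[j]'
-- (j produced by range(len(key_ans)-1,-1,-1) is always a valid non-negative index of acc,
--  so 'del key_ans[j]' is exactly acc.eraseIdx j.toNat)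
def pvAStep (q : String) (acc : List (List String)) (j : Int) : List (List String) :=
  if PySem.Str.isIn q (PySem.List.pyGetD (PySem.List.pyGetD acc j []) 0 "") then
    acc.eraseIdx j.toNat
  else acc

def define_recomm_keyword1 (key_ans : List (List String)) (key_qes : List (List String)) : List String :=
  -- for i in range(len(key_qes)): for j in range(len(key_ans)-1,-1,-1): …
  let pruned := (PySem.List.pyRange 0 (key_qes.length : Int) 1).foldl
    (fun ans i =>
      (PySem.List.pyRange ((ans.length : Int) - 1) (-1) (-1)).foldl
        (pvAStep (PySem.List.pyGetD (PySem.List.pyGetD key_qes i []) 0 "")) ans)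
    key_ans
  -- for item in key_ans: keyword_list.append(item[0].replace(' ',''))
  pruned.foldl (fun kl item => kl ++ [PySem.Str.replace (PySem.List.pyGetD item 0 "") " " ""]) []

-- ===== PORT B =====
def define_recomm_keyword1_alt (key_ans : List (List String)) (key_qes : List (List String)) : List String :=
  let qs := key_qes.map (fun q => PySem.List.pyGetD q 0 "")
  let kept := key_ans.filter (fun a => !(qs.any (fun q => PySem.Str.isIn q (PySem.List.pyGetD a 0 ""))))
  kept.map (fun a => PySem.Str.replace (PySem.List.pyGetD a 0 "") " " "")

-- ===== PRECONDITION & SPEC =====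
-- Pre_ excludes the inputs with an empty inner list in key_ans or key_qes: there Python A raises
-- IndexError (key_qes[i][0] / key_ans[j][0] / item[0]) — except that with key_ans = [] A never
-- indexes key_qes[i][0] and returns [], while B extracts all question heads up front and raises.
def Pre_define_recomm_keyword1 (key_ans : List (List String)) (key_qes : List (List String)) : Prop :=
  (∀ a ∈ key_ans, a ≠ []) ∧ (∀ q ∈ key_qes, q ≠ [])
instance (key_ans : List (List String)) (key_qes : List (List String)) : Decidable (Pre_define_recomm_keyword1 key_ans key_qes) := by unfold Pre_define_recomm_keyword1; infer_instance

def pvWitness_define_recomm_keyword1 : List (List String) × List (List String) :=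
  ([["ab cd"], ["xy"]], [["x"]])

def Spec_define_recomm_keyword1 (key_ans : List (List String)) (key_qes : List (List String)) (out : List String) : Prop := out = define_recomm_keyword1_alt key_ans key_qes
instance (key_ans : List (List String)) (key_qes : List (List String)) (out : List String) : Decidable (Spec_define_recomm_keyword1 key_ans key_qes out) := by unfold Spec_define_recomm_keyword1; infer_instance

-- ===== CLAIM (what is proved, stated in full; the proofs are below) =====
def Claim_equal_define_recomm_keyword1 : Prop := ∀ (key_ans : List (List String)) (key_qes : List (List String)), Dom_define_recomm_keyword1 key_ans key_qes → Pre_define_recomm_keyword1 key_ans key_qes → Spec_define_recomm_keyword1 key_ans key_qes (define_recomm_keyword1 key_ans key_qes)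

-- ===== LEMMAS AND PROOFS =====

-- A's inner reverse-index deletion loop is a filter.
theorem pvInner_eq_filter (q : String) (xs t : List (List String)) :
    (PySem.List.pyRange ((xs.length : Int) - 1) (-1) (-1)).foldl (pvAStep q) (xs ++ t)
      = xs.filter (fun a => !(PySem.Str.isIn q (PySem.List.pyGetD a 0 ""))) ++ t := by
  induction xs using List.reverseRecOn generalizing t with
  | nil =>
      rw [PySem.List.pyRange_neg_one_eq_nil (by simp)]
      simp
  | append_singleton ys x ih =>
      have hlen : ((ys ++ [x]).length : Int) - 1 = (ys.length : Int) := by simp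
      rw [hlen, PySem.List.pyRange_neg_one_cons (by omega)]
      have hget : PySem.List.pyGetD (ys ++ [x] ++ t) (ys.length : Int) [] = x := by
        rw [PySem.List.pyGetD_natCast]
        simp [List.getD]
      simp only [List.foldl_cons]
      by_cases hx : PySem.Str.isIn q (PySem.List.pyGetD x 0 "") = true
      all_goals have hx' := hx
      all_goals simp only [PySem.Str.isIn_eq] at hx'
      · have hstep : pvAStep q (ys ++ [x] ++ t) (ys.length : Int) = ys ++ t := by
          simp only [pvAStep, hget, hx, if_pos]
          simp [List.append_assoc, List.eraseIdx_append_of_length_le]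
        rw [hstep, ih t]
        simp [List.filter_append, hx']
      · have hstep : pvAStep q (ys ++ [x] ++ t) (ys.length : Int) = ys ++ (x :: t) := by
          simp [pvAStep, hx']
        rw [hstep, ih (x :: t)]
        simp [List.filter_append, hx']

-- folding filters over the question list is one filter with List.all
theorem pvFoldFilter {α β : Type} (p : β → α → Bool) (qs : List β) (xs : List α) :
    qs.foldl (fun ans q => ans.filter (fun a => p q a)) xs
      = xs.filter (fun a => qs.all (fun q => p q a)) := by
  induction qs generalizing xs with
  | nil => simp
  | cons q qs ih =>
      simp only [List.foldl_cons, ih, List.filter_filter, List.all_cons]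
      congr 1
      funext a
      rw [Bool.and_comm]

theorem pvAllNotAny {α β : Type} (f : β → α → Bool) (qs : List β) (a : α) :
    qs.all (fun q => !(f q a)) = !(qs.any (fun q => f q a)) := by
  induction qs with
  | nil => simp
  | cons q qs ih => simp [ih]

-- ===== VERDICT (by name: the statement is the Claim_ definition above) =====
theorem define_recomm_keyword1_spec : Claim_equal_define_recomm_keyword1 := by
  intro key_ans key_qes _ _
  unfold Spec_define_recomm_keyword1 define_recomm_keyword1 define_recomm_keyword1_alt
  rw [PySem.List.foldl_append_singleton_eq_map]
  simp only []
  have houter :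
      (PySem.List.pyRange 0 (key_qes.length : Int) 1).foldl
        (fun ans i =>
          (PySem.List.pyRange ((ans.length : Int) - 1) (-1) (-1)).foldl
            (pvAStep (PySem.List.pyGetD (PySem.List.pyGetD key_qes i []) 0 "")) ans)
        key_ans
      = key_ans.filter (fun a =>
          key_qes.all (fun q => !(PySem.Str.isIn (PySem.List.pyGetD q 0 "") (PySem.List.pyGetD a 0 "")))) := by
    rw [PySem.List.foldl_pyRange_zero_pyGetD' key_qes []
        (fun ans q =>
          (PySem.List.pyRange ((ans.length : Int) - 1) (-1) (-1)).foldl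
            (pvAStep (PySem.List.pyGetD q 0 "")) ans) key_ans]
    have hstep : ∀ (xs : List (List String)) (q : List String),
        (PySem.List.pyRange ((xs.length : Int) - 1) (-1) (-1)).foldl
            (pvAStep (PySem.List.pyGetD q 0 "")) xs
          = xs.filter (fun a => !(PySem.Str.isIn (PySem.List.pyGetD q 0 "") (PySem.List.pyGetD a 0 ""))) := by
      intro xs q
      have := pvInner_eq_filter (PySem.List.pyGetD q 0 "") xs []
      simpa using this
    calc key_qes.foldl (fun ans q =>
            (PySem.List.pyRange ((ans.length : Int) - 1) (-1) (-1)).foldl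
              (pvAStep (PySem.List.pyGetD q 0 "")) ans) key_ans
        = key_qes.foldl (fun ans q =>
            ans.filter (fun a => !(PySem.Str.isIn (PySem.List.pyGetD q 0 "") (PySem.List.pyGetD a 0 "")))) key_ans := by
          apply PySem.List.foldl_congr_mem
          intro ans q _
          exact hstep ans q
      _ = _ := pvFoldFilter (fun q a => !(PySem.Str.isIn (PySem.List.pyGetD q 0 "") (PySem.List.pyGetD a 0 ""))) key_qes key_ans
  rw [houter, List.nil_append]
  congr 1
  apply List.filter_congr
  intro a _
  rw [List.any_map]
  exact pvAllNotAny (fun q a => PySem.Str.isIn (PySem.List.pyGetD q 0 "") (PySem.List.pyGetD a 0 "")) key_qes a
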